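-- pv_equiv track=rewrite | github.com/alejio/convfinqa-agent | src/functions/query_parser.py | _match_columns_intelligently
-- ===== SOURCE A (Python) =====
-- def _match_columns_intelligently(
--     mentioned_columns: list[str], available_columns: list[str]
-- ) -> list[str]:
--     """Intelligently match mentioned columns to available columns using DSPy-enhanced matching."""
--     matched_columns = []
--
--     for mentioned in mentioned_columns:
--         mentioned_lower = mentioned.lower().strip()
--
--         # Direct match first
--         for available in available_columns:
--             if mentioned_lower == available.lower():
--                 matched_columns.append(available)
--                 break
--         else:
--             # Fuzzy matching for partial matches
--             for available in available_columns:
--                 if (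
--                     mentioned_lower in available.lower()
--                     or available.lower() in mentioned_lower
--                 ):
--                     matched_columns.append(available)
--                     break
--
--     return matched_columns
-- ===== SOURCE B (Python) =====
-- def _match_columns_intelligently(
--     mentioned_columns: list[str], available_columns: list[str]
-- ) -> list[str]:
--     """Single-pass matching: break on first exact match, else first fuzzy candidate."""
--     matched_columns = []
--     for mentioned in mentioned_columns:
--         mentioned_lower = mentioned.lower().strip()
--         result = None
--         fuzzy = None
--         for available in available_columns:
--             available_lower = available.lower()
--             if available_lower == mentioned_lower:
--                 result = available
--                 break
--             if fuzzy is None and (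
--                 mentioned_lower in available_lower
--                 or available_lower in mentioned_lower
--             ):
--                 fuzzy = available
--         else:
--             result = fuzzy
--         if result is not None:
--             matched_columns.append(result)
--     return matched_columns
-- ===== Notes on version B (the rewrite author's own statement) =====
-- stated objective: alternative
-- what changed: Replaces A's two sequential scans of available_columns per mentioned column (exact scan, then a separate fuzzy rescan) with a single scan that breaks on the first exact match while remembering the first fuzzy candidate as a fallback.
import Mathlib
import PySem

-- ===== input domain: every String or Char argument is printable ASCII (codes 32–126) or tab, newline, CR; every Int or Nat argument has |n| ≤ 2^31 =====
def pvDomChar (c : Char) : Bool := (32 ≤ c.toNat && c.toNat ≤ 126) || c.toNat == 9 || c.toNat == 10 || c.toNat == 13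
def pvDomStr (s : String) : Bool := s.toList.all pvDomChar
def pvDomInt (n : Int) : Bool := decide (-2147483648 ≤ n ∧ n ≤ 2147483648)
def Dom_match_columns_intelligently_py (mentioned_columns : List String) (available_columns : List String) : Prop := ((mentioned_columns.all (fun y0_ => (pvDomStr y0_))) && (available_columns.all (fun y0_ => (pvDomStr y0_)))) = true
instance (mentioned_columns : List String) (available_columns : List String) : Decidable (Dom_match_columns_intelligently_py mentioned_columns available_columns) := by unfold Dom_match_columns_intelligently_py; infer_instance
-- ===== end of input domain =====

-- B replaces A's two sequential scans per mentioned column with one scan that breaks on the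
-- first exact match and remembers the first fuzzy candidate as a fallback (alternative, same cost).


-- ===== PORT A =====
-- the fuzzy test: mentioned_lower in available.lower() or available.lower() in mentioned_lower
def pvFuzzyP (ml : String) (a : String) : Bool :=
  PySem.Str.isIn ml (PySem.Str.lower a) || PySem.Str.isIn (PySem.Str.lower a) ml

def match_columns_intelligently_py (mentioned_columns : List String) (available_columns : List String) : List String :=
  mentioned_columns.foldl (fun matched mentioned =>
    let ml := PySem.Str.strip (PySem.Str.lower mentioned)
    -- direct match first (for … break / else)
    match available_columns.find? (fun a => ml == PySem.Str.lower a) with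
    | some a => matched ++ [a]
    | none =>
      -- fuzzy matching for partial matches (second scan)
      match available_columns.find? (fun a => pvFuzzyP ml a) with
      | some a => matched ++ [a]
      | none => matched) []

-- ===== PORT B =====
-- single scan: break with the exact match, else remember the first fuzzy candidate
def pvScanOne (ml : String) : List String → Option String → Option String
  | [], fuzzy => fuzzy
  | a :: rest, fuzzy =>
    if ml == PySem.Str.lower a then some a
    else if fuzzy.isNone && pvFuzzyP ml a then pvScanOne ml rest (some a)
    else pvScanOne ml rest fuzzy

def match_columns_intelligently_py_alt (mentioned_columns : List String) (available_columns : List String) : List String :=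
  mentioned_columns.foldl (fun matched mentioned =>
    match pvScanOne (PySem.Str.strip (PySem.Str.lower mentioned)) available_columns none with
    | some a => matched ++ [a]
    | none => matched) []

-- ===== PRECONDITION & SPEC =====
def Spec_match_columns_intelligently_py (mentioned_columns : List String) (available_columns : List String) (out : List String) : Prop := out = match_columns_intelligently_py_alt mentioned_columns available_columns
instance (mentioned_columns : List String) (available_columns : List String) (out : List String) : Decidable (Spec_match_columns_intelligently_py mentioned_columns available_columns out) := by unfold Spec_match_columns_intelligently_py; infer_instance

-- ===== CLAIM (what is proved, stated in full; the proofs are below) =====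
def Claim_equal_match_columns_intelligently_py : Prop := ∀ (mentioned_columns : List String) (available_columns : List String), Dom_match_columns_intelligently_py mentioned_columns available_columns → Spec_match_columns_intelligently_py mentioned_columns available_columns (match_columns_intelligently_py mentioned_columns available_columns)

-- ===== LEMMAS AND PROOFS =====
-- B's single scan = A's exact scan, falling back to the pending candidate, then A's fuzzy scan
theorem pvScanOne_eq (ml : String) (avail : List String) (fuzzy : Option String) :
    pvScanOne ml avail fuzzy =
      match avail.find? (fun a => ml == PySem.Str.lower a) with
      | some a => some a
      | none => match fuzzy with
        | some f => some f
        | none => avail.find? (fun a => pvFuzzyP ml a) := by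
  induction avail generalizing fuzzy with
  | nil => cases fuzzy <;> simp [pvScanOne]
  | cons a rest ih =>
    by_cases hx : (ml == PySem.Str.lower a) = true
    · simp [pvScanOne, List.find?, hx]
    · cases fuzzy with
      | some f =>
        simp [pvScanOne, List.find?, hx, ih]
      | none =>
        by_cases hf : pvFuzzyP ml a = true
        · simp [pvScanOne, List.find?, hx, hf, ih]
        · simp [pvScanOne, List.find?, hx, hf, ih]

-- ===== VERDICT (by name: the statement is the Claim_ definition above) =====
theorem match_columns_intelligently_py_spec : Claim_equal_match_columns_intelligently_py := by
  intro mc ac _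
  unfold Spec_match_columns_intelligently_py
  unfold match_columns_intelligently_py match_columns_intelligently_py_alt
  apply List.foldl_ext
  intro matched mentioned _
  rw [pvScanOne_eq]
  cases h : ac.find? (fun a => PySem.Str.strip (PySem.Str.lower mentioned) == PySem.Str.lower a) with
  | some a => simp [h]
  | none => simp [h]
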